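-- pv_equiv track=rewrite | github.com/Denigmma/agent_doc_system | latex_engine/compiler.py | _sanitize_name
-- ===== SOURCE A (Python) =====
-- def _sanitize_name(value: str) -> str:
--     allowed = []
--     for ch in value.strip():
--         if ch.isalnum() or ch in {"-", "_"}:
--             allowed.append(ch)
--         else:
--             allowed.append("_")
--
--     sanitized = "".join(allowed).strip("_")
--     while "__" in sanitized:
--         sanitized = sanitized.replace("__", "_")
--     return sanitized
-- ===== SOURCE B (Python) =====
-- def _sanitize_name(value: str) -> str:
--     tokens = []
--     cur = []
--     for ch in value.strip():
--         if ch.isalnum() or ch == "-":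
--             cur.append(ch)
--         elif cur:
--             tokens.append("".join(cur))
--             cur = []
--     if cur:
--         tokens.append("".join(cur))
--     return "_".join(tokens)
-- ===== Notes on version B (the rewrite author's own statement) =====
-- stated objective: simpler
-- what changed: Single tokenizing pass (accumulate runs of alnum/dash characters, flush on any other character) joined with single separators, replacing A's per-character mapping to the separator plus edge-strip plus a repeated whole-string replace loop that collapses separator runs.
import Mathlib
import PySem

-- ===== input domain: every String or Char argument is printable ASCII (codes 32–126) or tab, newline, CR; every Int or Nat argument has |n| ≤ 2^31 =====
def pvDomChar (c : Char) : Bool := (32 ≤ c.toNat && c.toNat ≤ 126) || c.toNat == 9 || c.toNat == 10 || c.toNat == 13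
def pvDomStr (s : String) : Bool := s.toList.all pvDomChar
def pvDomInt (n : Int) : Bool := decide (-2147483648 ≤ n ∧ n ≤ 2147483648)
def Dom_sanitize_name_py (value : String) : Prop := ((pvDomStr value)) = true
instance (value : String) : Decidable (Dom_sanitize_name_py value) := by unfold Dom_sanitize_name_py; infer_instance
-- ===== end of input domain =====

-- B replaces A's map-to-underscore + strip('_') + repeated "__"-replace collapse loop by a
-- single tokenizing pass (runs of alnum/'-' chars) joined with '_'; same return value, simpler.


-- ===== PORT A =====
-- pvPassF is ONE pass of s.replace("__", "_"); it is proved equal to PySem.Chars.replace and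
-- sits above the port only because pvCollapse's termination proof cites it.
def pvPassF : List Char → List Char
  | [] => []
  | [c] => [c]
  | c1 :: c2 :: t => if c1 = '_' ∧ c2 = '_' then '_' :: pvPassF t else c1 :: pvPassF (c2 :: t)

theorem pvReplace_go_eq (fuel : Nat) (l acc : List Char) (h : l.length ≤ fuel) :
    PySem.Chars.replace.go ['_','_'] ['_'] fuel l acc = acc.reverse ++ pvPassF l := by
  induction fuel generalizing l acc with
  | zero =>
    have : l = [] := by cases l <;> simp_all
    subst this
    simp [PySem.Chars.replace.go, pvPassF]
  | succ fuel ih =>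
    cases l with
    | nil => simp [PySem.Chars.replace.go, pvPassF]
    | cons c t =>
      rw [PySem.Chars.replace.go]
      by_cases hp : List.isPrefixOf ['_','_'] (c :: t) = true
      · rw [if_pos hp]
        obtain ⟨c2, t', rfl⟩ : ∃ c2 t', t = c2 :: t' := by
          cases t with
          | nil => simp [List.isPrefixOf] at hp
          | cons a b => exact ⟨a, b, rfl⟩
        have hc : '_' = c ∧ '_' = c2 := by simpa [List.isPrefixOf] using hp
        obtain ⟨rfl, rfl⟩ : c = '_' ∧ c2 = '_' := ⟨hc.1.symm, hc.2.symm⟩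
        have hd : List.drop (['_','_'] : List Char).length ('_'::'_'::t') = t' := by simp
        rw [hd]
        simp at h
        rw [ih t' _ (by omega)]
        simp [pvPassF]
      · rw [if_neg hp]
        simp at h
        rw [ih _ _ (by omega)]
        cases t with
        | nil => simp [pvPassF]
        | cons c2 t' =>
          have : ¬ (c = '_' ∧ c2 = '_') := by
            intro ⟨h1, h2⟩; subst h1; subst h2; simp [List.isPrefixOf] at hp
          simp [pvPassF, this]

theorem pvReplace_eq (s : List Char) :
    PySem.Chars.replace s ['_','_'] ['_'] = pvPassF s := by
  simpa [PySem.Chars.replace] using pvReplace_go_eq s.length s [] le_rfl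

theorem pvPassF_length_le (s : List Char) : (pvPassF s).length ≤ s.length := by
  fun_induction pvPassF s with
  | case1 => simp
  | case2 c => simp
  | case3 c1 c2 t h ih => simp [h]; omega
  | case4 c1 c2 t h ih => simp; simpa using ih

theorem pvPassF_length_lt (s : List Char) (h : ['_','_'] <:+: s) :
    (pvPassF s).length < s.length := by
  fun_induction pvPassF s with
  | case1 => simp at h
  | case2 c =>
    exfalso
    obtain ⟨p, q, hpq⟩ := h
    have := congrArg List.length hpq
    simp at this
    omega
  | case3 c1 c2 t hde ih =>
    have := pvPassF_length_le t
    simp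
    omega
  | case4 c1 c2 t hde ih =>
    have hh : ['_','_'] <:+: c2 :: t := by
      rcases (List.infix_cons_iff).mp h with hp | hs
      · exfalso
        obtain ⟨r, hr⟩ := hp
        simp at hr
        exact hde ⟨hr.1.symm, hr.2.1.symm⟩
      · exact hs
    have := ih hh
    simp at this ⊢
    omega

def pvCollapse (s : List Char) : List Char :=
  if h : PySem.Chars.isIn ['_','_'] s = true then
    pvCollapse (PySem.Chars.replace s ['_','_'] ['_'])
  else s
termination_by s.length
decreasing_by
  rw [pvReplace_eq]
  exact pvPassF_length_lt s ((PySem.Chars.isIn_iff_infix _ _).mp h)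

def sanitize_name_py (value : String) : String :=
  let allowed : List (List Char) := (PySem.Str.strip value).toList.foldl
    (fun acc ch =>
      acc ++ [if PySem.Chars.isalnum ch || (ch == '-' || ch == '_') then [ch] else ['_']]) []
  let sanitized := PySem.Chars.stripChars (PySem.Chars.join [] allowed) ['_']
  String.ofList (pvCollapse sanitized)

-- ===== PORT B =====
def sanitize_name_py_alt (value : String) : String :=
  let st := (PySem.Str.strip value).toList.foldl
    (fun (st : List (List Char) × List Char) ch =>
      if PySem.Chars.isalnum ch || ch == '-' then (st.1, st.2 ++ [ch])
      else if st.2.isEmpty then st else (st.1 ++ [st.2], []))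
    ([], [])
  let toks := if st.2.isEmpty then st.1 else st.1 ++ [st.2]
  String.ofList (PySem.Chars.join ['_'] toks)

-- ===== PRECONDITION & SPEC =====
def Spec_sanitize_name_py (value : String) (out : String) : Prop := out = sanitize_name_py_alt value
instance (value : String) (out : String) : Decidable (Spec_sanitize_name_py value out) := by unfold Spec_sanitize_name_py; infer_instance

-- ===== CLAIM (what is proved, stated in full; the proofs are below) =====
def Claim_equal_sanitize_name_py : Prop := ∀ (value : String), Dom_sanitize_name_py value → Spec_sanitize_name_py value (sanitize_name_py value)

-- ===== LEMMAS AND PROOFS =====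

-- the character classes of the two programs
def pvKeep (c : Char) : Bool := PySem.Chars.isalnum c || c == '-'
def pvKeepU (c : Char) : Bool := !(c == '_')
def pvF (c : Char) : Char :=
  if PySem.Chars.isalnum c || (c == '-' || c == '_') then c else '_'

-- normal form of the collapse loop: every maximal '_' run shrunk to a single '_'
def pvSqueeze : List Char → List Char
  | [] => []
  | c :: t =>
    if c = '_' then '_' :: pvSqueeze (t.dropWhile (· == '_')) else c :: pvSqueeze t
termination_by s => s.length
decreasing_by
  · have := List.length_dropWhile_le (· == '_') t; simp; omega
  · simp

-- the tokenizer (B's algorithm, parametric in the kept-character class)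
def pvTok (p : Char → Bool) (cur : List Char) : List Char → List (List Char)
  | [] => if cur.isEmpty then [] else [cur]
  | c :: t => if p c then pvTok p (cur ++ [c]) t else if cur.isEmpty then pvTok p [] t else cur :: pvTok p [] t

theorem pvDropWhile_passF (t : List Char) :
    (pvPassF t).dropWhile (· == '_') = pvPassF (t.dropWhile (· == '_')) := by
  fun_induction pvPassF t with
  | case1 => simp [pvPassF]
  | case2 c =>
    by_cases hc : c = '_' <;> simp [pvPassF, hc]
  | case3 c1 c2 t hde ih =>
    obtain ⟨rfl, rfl⟩ := hde
    simpa [pvPassF] using ih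
  | case4 c1 c2 t hde ih =>
    by_cases h1 : c1 = '_'
    · subst h1
      have h2 : ¬ c2 = '_' := fun h => hde ⟨rfl, h⟩
      simp [pvPassF, h2, hde, List.dropWhile_cons] at ih ⊢
      simpa [h2] using ih
    · simp [pvPassF, h1, hde]

theorem pvSqueeze_passF_n (n : Nat) : ∀ s : List Char, s.length ≤ n →
    pvSqueeze (pvPassF s) = pvSqueeze s := by
  induction n with
  | zero =>
    intro s hs
    have : s = [] := by cases s <;> simp_all
    subst this; rfl
  | succ n ih =>
    intro s hs
    match s with
    | [] => rfl
    | [c] => rfl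
    | c1 :: c2 :: t =>
      simp at hs
      by_cases hde : c1 = '_' ∧ c2 = '_'
      · obtain ⟨rfl, rfl⟩ := hde
        rw [show pvPassF ('_'::'_'::t) = '_' :: pvPassF t from by simp [pvPassF]]
        rw [pvSqueeze, pvSqueeze]
        simp only [if_pos rfl]
        rw [pvDropWhile_passF]
        rw [ih _ (le_trans (List.length_dropWhile_le _ _) (by omega))]
        simp [List.dropWhile_cons]
      · rw [show pvPassF (c1::c2::t) = c1 :: pvPassF (c2::t) from by simp [pvPassF, hde]]
        by_cases h1 : c1 = '_'
        · subst h1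
          have h2 : ¬ c2 = '_' := fun h => hde ⟨rfl, h⟩
          rw [pvSqueeze, pvSqueeze]
          simp only [if_pos rfl]
          rw [show (pvPassF (c2::t)).dropWhile (· == '_') = pvPassF (c2::t) from by
            rw [pvDropWhile_passF]; simp [List.dropWhile_cons, h2]]
          rw [show (c2::t).dropWhile (· == '_') = c2 :: t from by simp [List.dropWhile_cons, h2]]
          rw [ih _ (by simp; omega)]
        · rw [pvSqueeze, pvSqueeze]
          simp only [if_neg h1]
          rw [ih _ (by simp; omega)]

theorem pvSqueeze_passF (s : List Char) : pvSqueeze (pvPassF s) = pvSqueeze s :=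
  pvSqueeze_passF_n s.length s le_rfl

theorem pvSqueeze_of_no_dd (s : List Char) (h : ¬ (['_','_'] <:+: s)) : pvSqueeze s = s := by
  induction s with
  | nil => simp [pvSqueeze]
  | cons c t ih =>
    have ht : ¬ (['_','_'] <:+: t) := fun hh => h (List.infix_cons hh)
    by_cases hc : c = '_'
    · subst hc
      have hd : t.dropWhile (· == '_') = t := by
        cases t with
        | nil => rfl
        | cons d r =>
          have hdne : ¬ d = '_' := by
            rintro rfl
            exact h ⟨[], r, rfl⟩
          simp [hdne]
      rw [pvSqueeze, if_pos rfl, hd, ih ht]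
    · rw [pvSqueeze, if_neg hc, ih ht]

theorem pvCollapse_eq_squeeze_n (n : Nat) : ∀ s : List Char, s.length ≤ n →
    pvCollapse s = pvSqueeze s := by
  induction n with
  | zero =>
    intro s hs
    have : s = [] := by cases s <;> simp_all
    subst this
    rw [pvCollapse, dif_neg (by decide)]
    simp [pvSqueeze]
  | succ n ih =>
    intro s hs
    rw [pvCollapse]
    by_cases h : PySem.Chars.isIn ['_','_'] s = true
    · rw [dif_pos h, pvReplace_eq]
      have hinf := (PySem.Chars.isIn_iff_infix _ _).mp h
      rw [ih _ (by have := pvPassF_length_lt s hinf; omega)]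
      exact pvSqueeze_passF s
    · rw [dif_neg h]
      exact (pvSqueeze_of_no_dd s ((PySem.Chars.isIn_eq_false_iff _ _).mp (by simpa using h))).symm

theorem pvCollapse_eq_squeeze (s : List Char) : pvCollapse s = pvSqueeze s :=
  pvCollapse_eq_squeeze_n s.length s le_rfl

theorem pvTok_ne_nil (p : Char → Bool) (t : List Char) (cur : List Char) (h : cur ≠ []) :
    pvTok p cur t ≠ [] := by
  induction t generalizing cur with
  | nil => simp [pvTok, h]
  | cons c t ih =>
    simp only [pvTok]
    split
    · exact ih _ (by simp)
    · simp [List.isEmpty_iff, h]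

theorem pvTok_dropU (t : List Char) :
    pvTok pvKeepU [] (t.dropWhile (· == '_')) = pvTok pvKeepU [] t := by
  induction t with
  | nil => rfl
  | cons c t ih =>
    by_cases hc : c = '_'
    · subst hc; simpa [pvTok, pvKeepU] using ih
    · simp [hc]

theorem pvTok_all_u (us : List Char) (hus : ∀ c ∈ us, c = '_') :
    ∀ cur : List Char, pvTok pvKeepU cur us = if cur.isEmpty then [] else [cur] := by
  induction us with
  | nil => intro cur; rfl
  | cons c us ih =>
    intro cur
    have hc : c = '_' := hus c (by simp)
    subst hc
    have ih0 := ih (fun c hc => hus c (by simp [hc])) []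
    rw [pvTok, if_neg (by simp [pvKeepU])]
    by_cases hcur : cur = []
    · subst hcur
      simp only [List.isEmpty_nil, if_true]
      simpa using ih0
    · rw [if_neg (by simpa [List.isEmpty_iff] using hcur)]
      rw [ih (fun c hc => hus c (by simp [hc])) []]
      simp [List.isEmpty_iff, hcur]

theorem pvTok_append_u (l us : List Char) (hus : ∀ c ∈ us, c = '_') (cur : List Char) :
    pvTok pvKeepU cur (l ++ us) = pvTok pvKeepU cur l := by
  induction l generalizing cur with
  | nil =>
    simp only [List.nil_append]
    rw [pvTok_all_u us hus cur]
    rfl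
  | cons c l ih =>
    simp only [List.cons_append, pvTok]
    split
    · exact ih _
    · split
      · exact ih _
      · rw [ih _]

theorem pvTok_nonempty (t : List Char) (h : t ≠ []) (hl : t.getLast? ≠ some '_') :
    pvTok pvKeepU [] t ≠ [] := by
  induction t with
  | nil => simp at h
  | cons c t ih =>
    by_cases hc : c = '_'
    · subst hc
      have ht : t ≠ [] := by rintro rfl; simp at hl
      have hlt : t.getLast? ≠ some '_' := by
        cases t with
        | nil => simp at ht
        | cons d r => rwa [List.getLast?_cons_cons] at hl
      simpa [pvTok, pvKeepU] using ih ht hlt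
    · simp only [pvTok, pvKeepU]
      rw [if_pos (by simp [hc])]
      exact pvTok_ne_nil _ _ _ (by simp)

theorem pvHeadNotU (l : List Char) (h : (l.dropWhile (· == '_')).head? = some '_') : False := by
  cases hd : l.dropWhile (· == '_') with
  | nil => rw [hd] at h; simp at h
  | cons a r =>
    have hne : l.dropWhile (· == '_') ≠ [] := by simp [hd]
    have hthis := List.head_dropWhile_not (· == '_') (l := l) hne
    have hh : (l.dropWhile (· == '_')).head hne = '_' := by
      have := List.head?_eq_some_head (l := l.dropWhile (· == '_')) hne
      rw [h] at this
      exact ((Option.some.injEq _ _).mp this.symm)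
    rw [hh] at hthis
    simp at hthis

theorem pvLast_cons (c : Char) (t : List Char) (ht : t ≠ [])
    (h : (c :: t).getLast? ≠ some '_') : t.getLast? ≠ some '_' := by
  cases t with
  | nil => simp at ht
  | cons d r => rwa [List.getLast?_cons_cons] at h

theorem pvMain (n : Nat) :
    (∀ s : List Char, s.length ≤ n → s.head? ≠ some '_' → s.getLast? ≠ some '_' →
      pvSqueeze s = PySem.Chars.join ['_'] (pvTok pvKeepU [] s)) ∧
    (∀ t cur : List Char, t.length ≤ n → cur ≠ [] → t.getLast? ≠ some '_' →
      PySem.Chars.join ['_'] (pvTok pvKeepU cur t) = cur ++ pvSqueeze t) := by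
  induction n with
  | zero =>
    constructor
    · intro s hs _ _
      have : s = [] := by cases s <;> simp_all
      subst this
      simp [pvSqueeze, pvTok, PySem.Chars.join, List.intercalate]
    · intro t cur ht hcur _
      have : t = [] := by cases t <;> simp_all
      subst this
      rw [pvTok, if_neg (by simpa [List.isEmpty_iff] using hcur)]
      rw [PySem.Chars.join_singleton]
      simp [pvSqueeze]
  | succ n ihn =>
    constructor
    · intro s hs hhead hlast
      cases s with
      | nil => simp [pvSqueeze, pvTok, PySem.Chars.join, List.intercalate]
      | cons c t =>
        have hc : ¬ c = '_' := by
          intro hcc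
          subst hcc
          simp at hhead
        rw [pvSqueeze, if_neg hc]
        rw [pvTok, if_pos (by simp [pvKeepU, hc])]
        simp at hs
        by_cases ht : t = []
        · subst ht
          rw [pvTok, if_neg (by simp), PySem.Chars.join_singleton]
          simp [pvSqueeze]
        · rw [show ([] : List Char) ++ [c] = [c] from rfl]
          rw [ihn.2 t [c] (by omega) (by simp) (pvLast_cons c t ht hlast)]
          simp
    · intro t cur ht hcur hlast
      cases t with
      | nil =>
        rw [pvTok, if_neg (by simpa [List.isEmpty_iff] using hcur)]
        rw [PySem.Chars.join_singleton]
        simp [pvSqueeze]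
      | cons c t' =>
        simp at ht
        by_cases hc : c = '_'
        · subst hc
          have ht' : t' ≠ [] := by
            rintro rfl
            simp at hlast
          have hlast' : t'.getLast? ≠ some '_' := pvLast_cons _ t' ht' hlast
          rw [pvTok, if_neg (by simp [pvKeepU]),
              if_neg (by simpa [List.isEmpty_iff] using hcur)]
          rw [← pvTok_dropU]
          set d := t'.dropWhile (· == '_') with hd
          have hdne : d ≠ [] := by
            intro hnil
            have hall : ∀ x ∈ t', (x == '_') = true := List.dropWhile_eq_nil_iff.mp hnil
            have : t'.getLast? = some '_' := by
              have hmem := List.getLast_mem ht'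
              have hx := hall _ hmem
              simp at hx
              rw [List.getLast?_eq_some_getLast ht', hx]
            exact hlast' this
          have hdhead : d.head? ≠ some '_' := fun hh => pvHeadNotU t' hh
          have hdlast : d.getLast? ≠ some '_' := by
            obtain ⟨pre, hpre⟩ := List.dropWhile_suffix (l := t') (· == '_')
            rw [← hd] at hpre
            intro hh
            apply hlast'
            rw [← hpre, List.getLast?_append, hh]
            rfl
          have hdlen : d.length ≤ n := le_trans (List.length_dropWhile_le _ _) (by omega)
          have h1 := (ihn.1 d hdlen hdhead hdlast).symm
          cases htok : pvTok pvKeepU [] d with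
          | nil => exact absurd htok (pvTok_nonempty d hdne hdlast)
          | cons q rest =>
            rw [htok] at h1
            rw [PySem.Chars.join_cons_cons]
            rw [h1]
            rw [pvSqueeze, if_pos rfl, ← hd]
            simp
        · rw [pvTok, if_pos (by simp [pvKeepU, hc])]
          have hlast' : t'.getLast? ≠ some '_' := by
            by_cases ht' : t' = []
            · subst ht'; simp
            · exact pvLast_cons c t' ht' hlast
          rw [ihn.2 t' (cur ++ [c]) (by omega) (by simp) hlast']
          rw [pvSqueeze, if_neg hc]
          simp

theorem pvKeep_ne_underscore (c : Char) (h : pvKeep c = true) : (c == '_') = false := by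
  by_contra hc
  simp at hc
  subst hc
  exact absurd h (by decide)

theorem pvTok_map_F (cs : List Char) (cur : List Char) :
    pvTok pvKeepU cur (cs.map pvF) = pvTok pvKeep cur cs := by
  induction cs generalizing cur with
  | nil => rfl
  | cons c t ih =>
    by_cases hk : pvKeep c = true
    · have hne := pvKeep_ne_underscore c hk
      have hF : pvF c = c := by
        simp [pvKeep] at hk
        rcases hk with hk | hk
        · simp [pvF, hk]
        · simp [pvF, hk]
      simp only [List.map_cons, pvTok, hF]
      rw [if_pos (by simp [pvKeepU, hne]), if_pos hk, ih]
    · have hkf : pvKeep c = false := by simpa using hk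
      have hF : pvF c = '_' := by
        by_cases hc : c = '_'
        · simp [pvF, hc]
        · have h1 : PySem.Chars.isalnum c = false := by
            by_contra hh
            simp [pvKeep] at hkf
            simp_all
          have h2 : ¬ c = '-' := by
            rintro rfl
            simp [pvKeep] at hkf
          simp [pvF, h1, h2, hc]
      simp only [List.map_cons, pvTok, hF]
      rw [if_neg (show ¬ pvKeepU '_' = true by simp [pvKeepU]),
          if_neg (show ¬ pvKeep c = true from hk)]
      by_cases hcur : cur = []
      · subst hcur
        simp only [List.isEmpty_nil, if_true, ih]
      · rw [if_neg (by simpa [List.isEmpty_iff] using hcur),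
            if_neg (by simpa [List.isEmpty_iff] using hcur), ih]

-- B's fold produces exactly the tokenizer's output
theorem pvFoldB (l : List Char) (tokens : List (List Char)) (cur : List Char) :
    (let st := l.foldl
      (fun (st : List (List Char) × List Char) ch =>
        if PySem.Chars.isalnum ch || ch == '-' then (st.1, st.2 ++ [ch])
        else if st.2.isEmpty then st else (st.1 ++ [st.2], []))
      (tokens, cur)
     if st.2.isEmpty then st.1 else st.1 ++ [st.2]) = tokens ++ pvTok pvKeep cur l := by
  induction l generalizing tokens cur with
  | nil =>
    by_cases h : cur = [] <;> simp [pvTok, List.isEmpty_iff, h]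
  | cons c t ih =>
    simp only [List.foldl_cons]
    by_cases hk : pvKeep c = true
    · have hk' : (PySem.Chars.isalnum c || c == '-') = true := hk
      rw [if_pos hk']
      rw [pvTok, if_pos hk]
      exact ih tokens (cur ++ [c])
    · have hk' : ¬ ((PySem.Chars.isalnum c || c == '-') = true) := hk
      rw [if_neg hk']
      rw [pvTok, if_neg hk]
      by_cases hcur : cur = []
      · subst hcur
        simp only [List.isEmpty_nil, if_true]
        exact ih tokens []
      · have hne : ¬ cur.isEmpty = true := by simpa [List.isEmpty_iff] using hcur
        rw [if_neg hne, if_neg hne]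
        rw [show tokens ++ cur :: pvTok pvKeep [] t = (tokens ++ [cur]) ++ pvTok pvKeep [] t from by simp]
        exact ih (tokens ++ [cur]) []

-- strip("_") written with dropWhile on both ends
theorem pvStripChars_eq (m : List Char) :
    PySem.Chars.stripChars m ['_'] =
      ((m.dropWhile (· == '_')).reverse.dropWhile (· == '_')).reverse := by
  have hfun : (fun c => List.contains ['_'] c) = (fun c : Char => c == '_') := by
    funext c
    by_cases hc : c = '_' <;> simp [List.contains_eq_mem, hc]
  simp only [PySem.Chars.stripChars, hfun]

theorem pvStrip_last (m : List Char) :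
    (PySem.Chars.stripChars m ['_']).getLast? ≠ some '_' := by
  rw [pvStripChars_eq]
  intro h
  rw [List.getLast?_reverse] at h
  exact pvHeadNotU _ h

theorem pvStrip_head (m : List Char) :
    (PySem.Chars.stripChars m ['_']).head? ≠ some '_' := by
  rw [pvStripChars_eq]
  intro h
  rw [List.head?_reverse] at h
  set z := (m.dropWhile (· == '_')).reverse.dropWhile (· == '_') with hz
  have hzne : z ≠ [] := by
    intro hnil
    rw [hnil] at h
    simp at h
  obtain ⟨pre, hpre⟩ := List.dropWhile_suffix (l := (m.dropWhile (· == '_')).reverse) (· == '_')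
  have hy : (m.dropWhile (· == '_')).reverse.getLast? = some '_' := by
    rw [← hz] at hpre
    rw [← hpre, List.getLast?_append, h]
    rfl
  rw [List.getLast?_reverse] at hy
  exact pvHeadNotU _ hy

theorem pvTok_stripChars (m : List Char) :
    pvTok pvKeepU [] (PySem.Chars.stripChars m ['_']) = pvTok pvKeepU [] m := by
  rw [pvStripChars_eq]
  have hdecomp : m.dropWhile (· == '_') =
      ((m.dropWhile (· == '_')).reverse.dropWhile (· == '_')).reverse ++
      ((m.dropWhile (· == '_')).reverse.takeWhile (· == '_')).reverse := by
    rw [← List.reverse_append, List.takeWhile_append_dropWhile, List.reverse_reverse]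
  have hus : ∀ c ∈ ((m.dropWhile (· == '_')).reverse.takeWhile (· == '_')).reverse, c = '_' := by
    intro c hc
    rw [List.mem_reverse] at hc
    have := List.mem_takeWhile_imp hc
    simpa using this
  calc pvTok pvKeepU [] ((m.dropWhile (· == '_')).reverse.dropWhile (· == '_')).reverse
      = pvTok pvKeepU [] (m.dropWhile (· == '_')) := by
        conv_rhs => rw [hdecomp]
        exact (pvTok_append_u _ _ hus []).symm
    _ = pvTok pvKeepU [] m := pvTok_dropU m

-- ===== VERDICT (by name: the statement is the Claim_ definition above) =====
theorem sanitize_name_py_spec : Claim_equal_sanitize_name_py := by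
  intro value _
  unfold Spec_sanitize_name_py sanitize_name_py sanitize_name_py_alt
  simp only []
  set cs := (PySem.Str.strip value).toList with hcs
  have hsingle : ∀ ch : Char,
      (if PySem.Chars.isalnum ch || (ch == '-' || ch == '_') then [ch] else ['_']) = [pvF ch] := by
    intro ch
    unfold pvF
    split_ifs <;> rfl
  have hallowed : cs.foldl
      (fun acc ch =>
        acc ++ [if PySem.Chars.isalnum ch || (ch == '-' || ch == '_') then [ch] else ['_']]) [] =
      (cs.map pvF).map (fun c => [c]) := by
    have : (fun (acc : List (List Char)) ch =>
        acc ++ [if PySem.Chars.isalnum ch || (ch == '-' || ch == '_') then [ch] else ['_']]) =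
        (fun acc ch => acc ++ [(fun c => [pvF c]) ch]) := by
      funext acc ch
      rw [hsingle]
    rw [this, PySem.List.foldl_append_singleton_eq_map]
    simp [List.map_map, Function.comp]
  rw [hallowed, PySem.Chars.join_nil_singletons]
  set m := cs.map pvF with hm
  rw [pvCollapse_eq_squeeze]
  rw [(pvMain (PySem.Chars.stripChars m ['_']).length).1 _ le_rfl (pvStrip_head m) (pvStrip_last m)]
  rw [pvTok_stripChars m, hm, pvTok_map_F]
  have hb := pvFoldB cs [] []
  simp only [List.nil_append] at hb
  rw [← hb]
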